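-- pv_equiv track=rewrite | github.com/allu4prasad/coding- | easy_leetcode/strings/index_pair.py | indexPairs
-- ===== SOURCE A (Python) =====
-- def indexPairs(text, words):
--     results=[]
--     for i in words:
--         start=0
--         while start<len(text):
--             start=text.find(i,start)
--             if start==-1:
--                 break
--             results.append([start,start+len(i)-1])
--             start+=1
--     return (sorted(results))
-- ===== SOURCE B (Python) =====
-- def indexPairs(text, words):
--     # Single left-to-right scan of the text with the words pre-sorted by
--     # length, so matches are emitted already in sorted order (no final sort).
--     ws = sorted(words, key=len)
--     res = []
--     for i in range(len(text)):
--         for w in ws: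
--             if text[i:i + len(w)] == w:
--                 res.append([i, i + len(w) - 1])
--     return res
-- ===== Notes on version B (the rewrite author's own statement) =====
-- stated objective: alternative
-- what changed: B replaces A's word-major repeated str.find loops plus a final sort by one position-major left-to-right scan of the text over the words pre-sorted by length, which emits the pairs already in sorted order so the final sort disappears.
import Mathlib
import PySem

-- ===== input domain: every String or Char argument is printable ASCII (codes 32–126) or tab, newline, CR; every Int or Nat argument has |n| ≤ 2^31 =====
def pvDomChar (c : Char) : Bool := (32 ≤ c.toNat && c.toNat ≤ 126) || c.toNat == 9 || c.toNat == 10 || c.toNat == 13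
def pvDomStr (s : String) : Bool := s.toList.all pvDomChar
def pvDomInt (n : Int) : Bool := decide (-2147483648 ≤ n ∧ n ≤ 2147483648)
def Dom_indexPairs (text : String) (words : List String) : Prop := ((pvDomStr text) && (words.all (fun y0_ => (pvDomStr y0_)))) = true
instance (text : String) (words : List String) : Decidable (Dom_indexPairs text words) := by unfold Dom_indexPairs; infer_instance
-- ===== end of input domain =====

-- B replaces A's word-major find loops + final sort by one position-major scan over
-- length-sorted words that emits the pairs already in order (alternative algorithm, no speed claim).

-- ===== PORT A =====
-- the inner 'while start < len(text): start = text.find(i, start); …' loop of A;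
-- fuel only makes the recursion structural (the loop runs at most len(text) times,
-- since each iteration moves start forward by at least one)
def ipLoop (text w : String) : Nat → Int → List (List Int)
  | 0, _ => []
  | fuel + 1, start =>
    if start < PySem.Str.len text then
      if PySem.Str.findFrom text w start none = -1 then []
      else
        [PySem.Str.findFrom text w start none,
         PySem.Str.findFrom text w start none + PySem.Str.len w - 1] ::
          ipLoop text w fuel (PySem.Str.findFrom text w start none + 1)
    else []

def indexPairs (text : String) (words : List String) : List (List Int) :=
  PySem.List.sorted
    (words.foldl (fun acc w => acc ++ ipLoop text w (text.toList.length + 1) 0) [])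
    (fun x => x) false

-- ===== PORT B =====
def indexPairs_alt (text : String) (words : List String) : List (List Int) :=
  -- ws = sorted(words, key=len), inlined at its single use
  (PySem.List.pyRange 0 (PySem.Str.len text) 1).foldl
    (fun res i =>
      (PySem.List.sorted words (fun w => PySem.Str.len w) false).foldl
        (fun res2 w =>
          if PySem.Str.slice text (some i) (some (i + PySem.Str.len w)) = w
          then res2 ++ [[i, i + PySem.Str.len w - 1]]
          else res2)
        res)
    []

-- ===== PRECONDITION & SPEC =====
def Spec_indexPairs (text : String) (words : List String) (out : List (List Int)) : Prop := out = indexPairs_alt text words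
instance (text : String) (words : List String) (out : List (List Int)) : Decidable (Spec_indexPairs text words out) := by unfold Spec_indexPairs; infer_instance

-- ===== CLAIM (what is proved, stated in full; the proofs are below) =====
def Claim_equal_indexPairs : Prop := ∀ (text : String) (words : List String), Dom_indexPairs text words → Spec_indexPairs text words (indexPairs text words)

-- ===== LEMMAS AND PROOFS =====

-- the match predicate both programs test at position i
lemma pv_slice_pred_iff (text w : String) (i : Int) (h0 : 0 ≤ i) :
    (PySem.Str.slice text (some i) (some (i + PySem.Str.len w)) = w) ↔
      w.toList <+: text.toList.drop i.toNat := by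
  rw [← String.toList_inj]
  have h1 : (PySem.Str.slice text (some i) (some (i + PySem.Str.len w))).toList
      = PySem.List.slice text.toList (some i) (some (i + PySem.Str.len w)) := by
    simp [PySem.Str.slice, PySem.Chars.slice]
  rw [h1, PySem.Str.len_eq,
      PySem.List.slice_toNat text.toList h0 (by omega)]
  have h2 : (i + (w.toList.length : Int)).toNat - i.toNat = w.toList.length := by omega
  rw [h2, eq_comm]
  exact (List.prefix_iff_eq_take).symm

-- a prefix somewhere at/after position k is an infix of the drop-k suffix
lemma pv_infix_of_prefix_drop (t wl : List Char) (k j : Nat) (hkj : k ≤ j)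
    (h : wl <+: t.drop j) : wl <:+: t.drop k := by
  have hd : (t.drop k).drop (j - k) = t.drop j := by
    rw [List.drop_drop]; congr 1; omega
  exact (hd ▸ h.isInfix).trans (List.drop_suffix (j - k) (t.drop k)).isInfix

-- the inner while-loop of A collects, in increasing order, exactly the positions
-- i ∈ [k, len text) where w occurs
lemma ipLoop_spec (text w : String) : ∀ (fuel k : Nat),
    text.toList.length ≤ k + fuel →
    ipLoop text w fuel (k : Int) =
      ((PySem.List.pyRange (k : Int) (text.toList.length : Int) 1).filter
          (fun i => decide (PySem.Str.slice text (some i) (some (i + PySem.Str.len w)) = w))).map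
        (fun i => [i, i + PySem.Str.len w - 1]) := by
  intro fuel
  induction fuel with
  | zero =>
    intro k hf
    rw [PySem.List.pyRange_one_eq_nil (by exact_mod_cast hf)]
    rfl
  | succ fuel ih =>
    intro k hf
    by_cases hk : (k : Int) < PySem.Str.len text
    · have hkn : k < text.toList.length := by
        rw [PySem.Str.len_eq] at hk; exact_mod_cast hk
      have hkle : k ≤ text.toList.length := le_of_lt hkn
      rw [show ipLoop text w (fuel + 1) (k : Int)
          = if PySem.Str.findFrom text w (k : Int) none = -1 then []
            else
              [PySem.Str.findFrom text w (k : Int) none,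
               PySem.Str.findFrom text w (k : Int) none + PySem.Str.len w - 1] ::
                ipLoop text w fuel (PySem.Str.findFrom text w (k : Int) none + 1)
          from by simp only [ipLoop]; rw [if_pos hk]]
      rw [PySem.Str.findFrom_eq]
      by_cases hfind : PySem.Chars.findFrom text.toList w.toList (k : Int) none = -1
      · rw [if_pos hfind]
        have hno : ¬ w.toList <:+: text.toList.drop k :=
          (PySem.Chars.findFrom_natCast_eq_neg_one_iff text.toList w.toList k hkle).mp hfind
        rw [show ((PySem.List.pyRange (k : Int) (text.toList.length : Int) 1).filter
            (fun i => decide (PySem.Str.slice text (some i) (some (i + PySem.Str.len w)) = w))) = [] from ?_]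
        · rfl
        · rw [List.filter_eq_nil_iff]
          intro i hi
          obtain ⟨hi1, hi2⟩ := PySem.List.mem_pyRange_one.mp hi
          simp only [decide_eq_true_eq]
          intro hsl
          have h0i : (0 : Int) ≤ i := le_trans (by exact_mod_cast Nat.zero_le k) hi1
          have hpref := (pv_slice_pred_iff text w i h0i).mp hsl
          exact hno (pv_infix_of_prefix_drop text.toList w.toList k i.toNat (by omega) hpref)
      · rw [if_neg hfind]
        obtain ⟨hkf, hpref, hmin⟩ :=
          PySem.Chars.findFrom_natCast_spec text.toList w.toList k hkle hfind
        set f := PySem.Chars.findFrom text.toList w.toList (k : Int) none with hfdef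
        have hf0 : (0 : Int) ≤ f := le_trans (by exact_mod_cast Nat.zero_le k) hkf
        have hfcast : ((f.toNat : Int)) = f := Int.toNat_of_nonneg hf0
        have hflt : f.toNat < text.toList.length := by
          by_cases hwl : w.toList = []
          · -- empty word: findFrom returns k itself
            have : f = (k : Int) := by
              rw [hfdef, PySem.Chars.findFrom_natCast text.toList w.toList k hkle, hwl,
                  PySem.Chars.find_nil]
              simp
            rw [this]; simpa using hkn
          · have hlen := hpref.length_le
            have hpos : 0 < w.toList.length := List.length_pos_iff.mpr hwl
            rw [List.length_drop] at hlen
            omega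
        clear_value f
        -- split the range at f and peel f off
        have hsplit : PySem.List.pyRange (k : Int) (text.toList.length : Int) 1
            = PySem.List.pyRange (k : Int) f 1 ++
              (f :: PySem.List.pyRange (f + 1) (text.toList.length : Int) 1) := by
          rw [PySem.List.pyRange_one_append (k : Int) f (text.toList.length : Int) hkf
              (by omega)]
          congr 1
          exact PySem.List.pyRange_one_cons (by omega)
        rw [hsplit, List.filter_append, List.filter_cons]
        have hfilt1 : (PySem.List.pyRange (k : Int) f 1).filter
            (fun i => decide (PySem.Str.slice text (some i) (some (i + PySem.Str.len w)) = w)) = [] := by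
          rw [List.filter_eq_nil_iff]
          intro i hi
          obtain ⟨hi1, hi2⟩ := PySem.List.mem_pyRange_one.mp hi
          simp only [decide_eq_true_eq]
          intro hsl
          have h0i : (0 : Int) ≤ i := le_trans (by exact_mod_cast Nat.zero_le k) hi1
          exact hmin i.toNat (by omega) (by omega) ((pv_slice_pred_iff text w i h0i).mp hsl)
        have hfpred : (decide (PySem.Str.slice text (some f) (some (f + PySem.Str.len w)) = w)) = true := by
          simp only [decide_eq_true_eq]
          exact (pv_slice_pred_iff text w f hf0).mpr hpref
        rw [hfilt1, List.nil_append, if_pos hfpred, List.map_cons]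
        have hrec := ih (f.toNat + 1) (by omega)
        rw [show ((f.toNat + 1 : Nat) : Int) = f + 1 from by omega] at hrec
        rw [hrec]
    · have hkn : text.toList.length ≤ k := by
        rw [PySem.Str.len_eq] at hk; exact_mod_cast not_lt.mp hk
      rw [show ipLoop text w (fuel + 1) (k : Int) = [] from by simp only [ipLoop]; rw [if_neg hk],
          PySem.List.pyRange_one_eq_nil (by exact_mod_cast hkn)]
      rfl

-- flatMap of per-element singleton/empty blocks is map-of-filter
lemma pv_flatMap_single {β γ : Type} (ys : List β) (p : β → Bool) (f : β → γ) :
    (ys.flatMap fun b => if p b then [f b] else []) = (ys.filter p).map f := by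
  induction ys with
  | nil => rfl
  | cons y ys ih =>
    rw [List.flatMap_cons, List.filter_cons]
    by_cases hy : p y
    · rw [if_pos hy, if_pos hy, List.map_cons, ih]; rfl
    · rw [if_neg hy, if_neg hy, ih]; rfl

-- exchanging the two nested loops: word-major and position-major produce the
-- same pairs up to permutation
lemma pv_flatMap_exchange {α β γ : Type} (xs : List α) (ys : List β)
    (p : α → β → Bool) (f : α → β → γ) :
    (xs.flatMap fun a => (ys.filter (p a)).map (f a)).Perm
      (ys.flatMap fun b => ((xs.filter (fun a => p a b)).map (fun a => f a b))) := by
  induction xs with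
  | nil => simp
  | cons x xs ih =>
    rw [List.flatMap_cons]
    have hsplit : (ys.flatMap fun b => (((x :: xs).filter (fun a => p a b)).map (fun a => f a b)))
        = ys.flatMap fun b =>
            ((if p x b then [f x b] else []) ++ (xs.filter (fun a => p a b)).map (fun a => f a b)) := by
      congr 1
      funext b
      rw [List.filter_cons]
      by_cases hx : p x b
      · rw [if_pos hx, if_pos hx, List.map_cons]; rfl
      · rw [if_neg hx, if_neg hx]; rfl
    rw [hsplit]
    refine List.Perm.trans ?_ (List.flatMap_append_perm ys _ _)
    rw [pv_flatMap_single]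
    exact (List.Perm.refl _).append ih

-- two-element lists under Python's (lexicographic) list order
lemma pv_pair_le_left (a b c d : Int) (h : a < c) : ([a, b] : List Int) ≤ [c, d] :=
  le_of_lt (List.Lex.rel h)

lemma pv_pair_le_right (a b d : Int) (h : b ≤ d) : ([a, b] : List Int) ≤ [a, d] := by
  rcases lt_or_eq_of_le h with h' | h'
  · exact le_of_lt (List.Lex.cons (List.Lex.rel h'))
  · rw [h']

-- Python's sorted() on a list of lists (core LT instance) agrees with the
-- Mathlib linear-order instance, so any ≤-ordered rearrangement names its value
lemma pv_sorted_core_eq (xs ys : List (List Int)) (hp : ys.Perm xs)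
    (h : ys.Pairwise (· ≤ ·)) :
    @PySem.List.sorted (List Int) (List Int) List.instLT (fun a b => a.decidableLT b)
      xs (fun x => x) false = ys := by
  have hcast : @PySem.List.sorted (List Int) (List Int) List.instLT (fun a b => a.decidableLT b)
        xs (fun x => x) false
      = @PySem.List.sorted (List Int) (List Int) List.instLinearOrder.toLT
          LinearOrder.toDecidableLT xs (fun x => x) false := by
    rw [@PySem.List.sorted_eq_foldl_insertBy (List Int) (List Int) List.instLT
          (fun a b => a.decidableLT b) xs (fun x => x),
        @PySem.List.sorted_eq_foldl_insertBy (List Int) (List Int) List.instLinearOrder.toLT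
          LinearOrder.toDecidableLT xs (fun x => x)]
    apply PySem.List.foldl_congr_mem
    intro acc x _
    congr 1
    try funext a b
    try rw [decide_eq_decide]
    try exact List.lt_iff_lex_lt a b
  rw [hcast]
  exact PySem.List.sorted_id_eq_of_perm_of_pairwise xs ys hp h

theorem pv_main (text : String) (words : List String) :
    indexPairs text words = indexPairs_alt text words := by
  -- normal forms of the two ports
  have hA : indexPairs text words
      = PySem.List.sorted
          (words.flatMap fun w =>
            ((PySem.List.pyRange 0 (text.toList.length : Int) 1).filter
                (fun i => decide (PySem.Str.slice text (some i) (some (i + PySem.Str.len w)) = w))).map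
              (fun i => [i, i + PySem.Str.len w - 1]))
          (fun x => x) false := by
    unfold indexPairs
    rw [PySem.List.foldl_append_eq_flatMap, List.nil_append]
    congr 1
    congr 1
    funext w
    have := ipLoop_spec text w (text.toList.length + 1) 0 (by omega)
    simpa using this
  have hB : indexPairs_alt text words
      = (PySem.List.pyRange 0 (text.toList.length : Int) 1).flatMap fun i =>
          ((PySem.List.sorted words (fun w => PySem.Str.len w) false).filter
              (fun w => decide (PySem.Str.slice text (some i) (some (i + PySem.Str.len w)) = w))).map
            (fun w => [i, i + PySem.Str.len w - 1]) := by
    unfold indexPairs_alt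
    rw [show PySem.Str.len text = (text.toList.length : Int) from PySem.Str.len_eq text]
    rw [show (fun (res : List (List Int)) (i : Int) =>
          (PySem.List.sorted words (fun w => PySem.Str.len w) false).foldl
            (fun res2 w =>
              if PySem.Str.slice text (some i) (some (i + PySem.Str.len w)) = w
              then res2 ++ [[i, i + PySem.Str.len w - 1]]
              else res2)
            res)
        = (fun res i => res ++
            ((PySem.List.sorted words (fun w => PySem.Str.len w) false).filter
                (fun w => decide (PySem.Str.slice text (some i) (some (i + PySem.Str.len w)) = w))).map
              (fun w => [i, i + PySem.Str.len w - 1])) from ?_]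
    · rw [PySem.List.foldl_append_eq_flatMap, List.nil_append]
    · funext res i
      exact PySem.List.foldl_append_ite _ _ _ _
  rw [hA, hB]
  apply pv_sorted_core_eq
  · -- permutation: position-major over sorted words ~ word-major over the given words
    refine List.Perm.trans
      (List.Perm.symm (pv_flatMap_exchange
        (PySem.List.sorted words (fun w => PySem.Str.len w) false)
        (PySem.List.pyRange 0 (text.toList.length : Int) 1)
        (fun w i => decide (PySem.Str.slice text (some i) (some (i + PySem.Str.len w)) = w))
        (fun w i => [i, i + PySem.Str.len w - 1])))
      ?_
    exact (PySem.List.sorted_perm words (fun w => PySem.Str.len w) false).flatMap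
      (fun a _ => List.Perm.refl _)
  · -- the position-major output is already ≤-ordered
    rw [List.flatMap_def, List.pairwise_flatten]
    constructor
    · intro l hl
      obtain ⟨i, _, rfl⟩ := List.mem_map.mp hl
      rw [List.pairwise_map]
      have := (PySem.List.sorted_pairwise words (fun w => PySem.Str.len w)).filter
        (fun w => decide (PySem.Str.slice text (some i) (some (i + PySem.Str.len w)) = w))
      refine this.imp ?_
      intro a b hab
      exact pv_pair_le_right i (i + PySem.Str.len a - 1) (i + PySem.Str.len b - 1) (by omega)
    · rw [List.pairwise_map]
      refine (PySem.List.pairwise_lt_pyRange_one 0 (text.toList.length : Int)).imp ?_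
      intro i j hij x hx y hy
      obtain ⟨a, _, rfl⟩ := List.mem_map.mp hx
      obtain ⟨b, _, rfl⟩ := List.mem_map.mp hy
      exact pv_pair_le_left i (i + PySem.Str.len a - 1) j (j + PySem.Str.len b - 1) hij

-- ===== VERDICT (by name: the statement is the Claim_ definition above) =====
theorem indexPairs_spec : Claim_equal_indexPairs := by
  intro text words _
  unfold Spec_indexPairs
  exact pv_main text words
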